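-- pv_equiv track=rewrite | github.com/Bonorinoa/leanecon_v2 | src/_v1_archive/formalizer.py | _has_misplaced_import
-- ===== SOURCE A (Python) =====
-- LEAN_COMMAND_PREFIXES = (
--     "import ",
--     "open ",
--     "theorem ",
--     "lemma ",
--     "example ",
--     "def ",
--     "noncomputable ",
--     "namespace ",
--     "section ",
--     "variable ",
--     "/-",
--     "--",
--     "#",
-- )
--
-- def _is_comment_line(line: str) -> bool:
--     stripped = line.strip()
--     return not stripped or stripped.startswith(("--", "/-", "-/"))
--
-- def _has_misplaced_import(lean_code: str) -> bool:
--     saw_non_import_code = False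
--     for line in lean_code.splitlines():
--         stripped = line.strip()
--         if not stripped or _is_comment_line(line):
--             continue
--         if stripped.startswith("import "):
--             if saw_non_import_code:
--                 return True
--             continue
--         if stripped.startswith("open "):
--             saw_non_import_code = True
--             continue
--         if stripped.startswith(LEAN_COMMAND_PREFIXES):
--             saw_non_import_code = True
--     return False
-- ===== SOURCE B (Python) =====
-- _COMMENT_PREFIXES = ("--", "/-", "-/")
-- _CODE_PREFIXES = (
--     "open ",
--     "theorem ",
--     "lemma ",
--     "example ",
--     "def ",
--     "noncomputable ",
--     "namespace ",
--     "section ",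
--     "variable ",
--     "#",
-- )
--
-- def _tag(line):
--     s = line.strip()
--     if not s or s.startswith(_COMMENT_PREFIXES):
--         return ""
--     if s.startswith("import "):
--         return "I"
--     if s.startswith(_CODE_PREFIXES):
--         return "C"
--     return ""
--
-- def _has_misplaced_import(lean_code: str) -> bool:
--     tags = "".join(map(_tag, lean_code.splitlines()))
--     return "I" in tags.partition("C")[2]
-- ===== Notes on version B (the rewrite author's own statement) =====
-- stated objective: alternative
-- what changed: Replaces A's stateful scan with early return by a two-stage map-then-search: each line is classified into a one-character tag (import tag, code tag, or dropped), the tags are joined into a string, and the answer is computed purely by string search: does an import tag occur after the first code tag (tags.partition on the code tag, then membership test).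
import Mathlib
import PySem

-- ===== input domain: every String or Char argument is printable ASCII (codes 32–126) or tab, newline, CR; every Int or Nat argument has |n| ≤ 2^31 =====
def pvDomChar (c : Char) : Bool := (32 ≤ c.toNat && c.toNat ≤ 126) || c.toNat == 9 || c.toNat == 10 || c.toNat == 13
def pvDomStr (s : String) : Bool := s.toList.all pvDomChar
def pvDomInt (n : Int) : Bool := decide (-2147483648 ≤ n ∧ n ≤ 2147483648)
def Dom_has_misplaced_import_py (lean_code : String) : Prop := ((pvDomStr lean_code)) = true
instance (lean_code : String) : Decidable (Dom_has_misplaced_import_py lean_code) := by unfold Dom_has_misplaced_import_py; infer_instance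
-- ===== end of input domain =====

-- B replaces A's stateful scan (flag + early return) by a stateless map-then-search:
-- classify each line to a tag character, join the tags, and answer by string search alone.

-- ===== PORT A =====

-- _is_comment_line
def pyIsCommentLine (line : String) : Bool :=
  let stripped := PySem.Str.strip line
  stripped == "" || PySem.Str.startswith stripped "--" ||
    PySem.Str.startswith stripped "/-" || PySem.Str.startswith stripped "-/"

-- stripped.startswith(LEAN_COMMAND_PREFIXES), the full tuple in source order
def pyStartswithCmd (s : String) : Bool :=
  PySem.Str.startswith s "import " || PySem.Str.startswith s "open " ||
  PySem.Str.startswith s "theorem " || PySem.Str.startswith s "lemma " ||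
  PySem.Str.startswith s "example " || PySem.Str.startswith s "def " ||
  PySem.Str.startswith s "noncomputable " || PySem.Str.startswith s "namespace " ||
  PySem.Str.startswith s "section " || PySem.Str.startswith s "variable " ||
  PySem.Str.startswith s "/-" || PySem.Str.startswith s "--" ||
  PySem.Str.startswith s "#"

-- the for-loop over splitlines with state saw_non_import_code; `return True` = result true
def aLoop : List String → Bool → Bool
  | [], _ => false
  | line :: rest, saw =>
    let stripped := PySem.Str.strip line
    if stripped == "" || pyIsCommentLine line then aLoop rest saw
    else if PySem.Str.startswith stripped "import " then
      (if saw then true else aLoop rest saw)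
    else if PySem.Str.startswith stripped "open " then aLoop rest true
    else if pyStartswithCmd stripped then aLoop rest true
    else aLoop rest saw

def has_misplaced_import_py (lean_code : String) : Bool :=
  aLoop (PySem.Str.splitlines lean_code) false

-- ===== PORT B =====

-- stripped.startswith(_COMMENT_PREFIXES)
def bIsComment (s : String) : Bool :=
  PySem.Str.startswith s "--" || PySem.Str.startswith s "/-" || PySem.Str.startswith s "-/"

-- stripped.startswith(_CODE_PREFIXES)
def bStartsCode (s : String) : Bool :=
  PySem.Str.startswith s "open " || PySem.Str.startswith s "theorem " ||
  PySem.Str.startswith s "lemma " || PySem.Str.startswith s "example " ||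
  PySem.Str.startswith s "def " || PySem.Str.startswith s "noncomputable " ||
  PySem.Str.startswith s "namespace " || PySem.Str.startswith s "section " ||
  PySem.Str.startswith s "variable " || PySem.Str.startswith s "#"

-- _tag (tag strings are at most one character, kept as List Char)
def bTag (line : String) : List Char :=
  let s := PySem.Str.strip line
  if s == "" || bIsComment s then []
  else if PySem.Str.startswith s "import " then ['I']
  else if bStartsCode s then ['C']
  else []

-- tags.partition("C")[2], ported by hand for the single-character separator "C":
-- the part after the first 'C', empty when there is no 'C' — exact for this separator.
def bAfterC (ts : List Char) : List Char := (ts.dropWhile (· ≠ 'C')).drop 1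

-- "".join(map(_tag, lean_code.splitlines())) then "I" in tags.partition("C")[2]
def has_misplaced_import_py_alt (lean_code : String) : Bool :=
  let tags := ((PySem.Str.splitlines lean_code).map bTag).flatten
  PySem.Chars.isIn ['I'] (bAfterC tags)

-- ===== PRECONDITION & SPEC =====
def Spec_has_misplaced_import_py (lean_code : String) (out : Bool) : Prop := out = has_misplaced_import_py_alt lean_code
instance (lean_code : String) (out : Bool) : Decidable (Spec_has_misplaced_import_py lean_code out) := by unfold Spec_has_misplaced_import_py; infer_instance

-- ===== CLAIM =====
def Claim_equal_has_misplaced_import_py : Prop := ∀ (lean_code : String), Dom_has_misplaced_import_py lean_code → Spec_has_misplaced_import_py lean_code (has_misplaced_import_py lean_code)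

-- ===== LEMMAS AND PROOFS =====

-- 'I' in t, as list membership
theorem isIn_I (t : List Char) : PySem.Chars.isIn ['I'] t = t.contains 'I' := by
  by_cases h : 'I' ∈ t
  · obtain ⟨l1, l2, rfl⟩ := List.append_of_mem h
    have hinf : ['I'] <:+: l1 ++ 'I' :: l2 := ⟨l1, l2, by simp⟩
    simp [(PySem.Chars.isIn_iff_infix _ _).mpr hinf]
  · have hf : PySem.Chars.isIn ['I'] t ≠ true :=
      fun hc => h (((PySem.Chars.isIn_iff_infix _ _).mp hc).subset (by simp))
    simp only [Bool.not_eq_true] at hf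
    simp [hf, h]

-- A's skip condition equals bTag's first branch (B tests the stripped line, A re-strips)
theorem skip_eq (line : String) :
    (PySem.Str.strip line == "" || pyIsCommentLine line)
      = (PySem.Str.strip line == "" || bIsComment (PySem.Str.strip line)) := by
  simp [pyIsCommentLine, bIsComment, Bool.or_assoc]

-- on a non-comment, non-import line A's full-tuple test equals B's code-prefix test
theorem code_eq (line : String)
    (h1 : (PySem.Str.strip line == "" || bIsComment (PySem.Str.strip line)) = false)
    (h2 : PySem.Str.startswith (PySem.Str.strip line) "import " = false) :
    (PySem.Str.startswith (PySem.Str.strip line) "open "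
        || pyStartswithCmd (PySem.Str.strip line))
      = bStartsCode (PySem.Str.strip line) := by
  simp [bIsComment, Bool.or_eq_false_iff] at h1
  obtain ⟨-, ⟨hc1, hc2⟩, -⟩ := h1
  simp at h2
  by_cases h3 : PySem.Chars.startswith (PySem.Chars.strip line.toList)
      ['o', 'p', 'e', 'n', ' '] = true
  · simp [pyStartswithCmd, bStartsCode, h2, hc1, hc2, h3]
  · rw [Bool.not_eq_true] at h3
    simp [pyStartswithCmd, bStartsCode, h2, hc1, hc2, h3]

-- bTag per case of A's branch tests
theorem bTag_skip (line : String)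
    (h1 : (PySem.Str.strip line == "" || bIsComment (PySem.Str.strip line)) = true) :
    bTag line = [] := by
  simp only [bTag, h1, if_true]

theorem bTag_import (line : String)
    (h1 : (PySem.Str.strip line == "" || bIsComment (PySem.Str.strip line)) = false)
    (h2 : PySem.Str.startswith (PySem.Str.strip line) "import " = true) :
    bTag line = ['I'] := by
  simp only [bTag, h1, Bool.false_eq_true, if_false, h2, if_true]

theorem bTag_code (line : String)
    (h1 : (PySem.Str.strip line == "" || bIsComment (PySem.Str.strip line)) = false)
    (h2 : PySem.Str.startswith (PySem.Str.strip line) "import " = false)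
    (hcode : bStartsCode (PySem.Str.strip line) = true) :
    bTag line = ['C'] := by
  simp only [bTag, h1, h2, hcode, Bool.false_eq_true, if_false, if_true]

theorem bTag_plain (line : String)
    (h1 : (PySem.Str.strip line == "" || bIsComment (PySem.Str.strip line)) = false)
    (h2 : PySem.Str.startswith (PySem.Str.strip line) "import " = false)
    (hcode : bStartsCode (PySem.Str.strip line) = false) :
    bTag line = [] := by
  simp only [bTag, h1, h2, hcode, Bool.false_eq_true, if_false]

-- with the flag already set, A returns true iff a later import exists,
-- i.e. iff the tag string of the remaining lines contains 'I'
theorem aLoop_true (lines : List String) :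
    aLoop lines true = ((lines.map bTag).flatten).contains 'I' := by
  induction lines with
  | nil => simp [aLoop]
  | cons line rest ih =>
    simp only [aLoop, List.map_cons, List.flatten_cons]
    rw [skip_eq]
    by_cases h1 : (PySem.Str.strip line == "" || bIsComment (PySem.Str.strip line)) = true
    · rw [bTag_skip line h1, List.nil_append]
      simp only [h1, if_true]
      exact ih
    · rw [Bool.not_eq_true] at h1
      simp only [h1, Bool.false_eq_true, if_false]
      by_cases h2 : PySem.Str.startswith (PySem.Str.strip line) "import " = true
      · rw [bTag_import line h1 h2]
        simp only [h2, if_true]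
        simp
      · rw [Bool.not_eq_true] at h2
        have hc := code_eq line h1 h2
        by_cases h3 : PySem.Str.startswith (PySem.Str.strip line) "open " = true
        · have hcode : bStartsCode (PySem.Str.strip line) = true := by rw [← hc, h3]; simp
          rw [bTag_code line h1 h2 hcode]
          simp only [h2, Bool.false_eq_true, if_false, h3, if_true]
          rw [ih]; simp
        · rw [Bool.not_eq_true] at h3
          by_cases h4 : pyStartswithCmd (PySem.Str.strip line) = true
          · have hcode : bStartsCode (PySem.Str.strip line) = true := by rw [← hc, h4]; simp
            rw [bTag_code line h1 h2 hcode]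
            simp only [h2, h3, Bool.false_eq_true, if_false, h4, if_true]
            rw [ih]; simp
          · rw [Bool.not_eq_true] at h4
            have hcode : bStartsCode (PySem.Str.strip line) = false := by rw [← hc, h3, h4]; rfl
            rw [bTag_plain line h1 h2 hcode, List.nil_append]
            simp only [h2, h3, h4, Bool.false_eq_true, if_false]
            exact ih

-- tag-string steps of B's search
theorem bAfterC_I (ts : List Char) : bAfterC ('I' :: ts) = bAfterC ts := by
  simp [bAfterC, List.dropWhile]

theorem bAfterC_C (ts : List Char) : bAfterC ('C' :: ts) = ts := by
  simp [bAfterC, List.dropWhile]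

-- the main correspondence: A's scan from the initial state equals B's search
theorem aLoop_false (lines : List String) :
    aLoop lines false = (bAfterC ((lines.map bTag).flatten)).contains 'I' := by
  induction lines with
  | nil => simp [aLoop, bAfterC]
  | cons line rest ih =>
    simp only [aLoop, List.map_cons, List.flatten_cons]
    rw [skip_eq]
    by_cases h1 : (PySem.Str.strip line == "" || bIsComment (PySem.Str.strip line)) = true
    · rw [bTag_skip line h1, List.nil_append]
      simp only [h1, if_true]
      exact ih
    · rw [Bool.not_eq_true] at h1
      simp only [h1, Bool.false_eq_true, if_false]
      by_cases h2 : PySem.Str.startswith (PySem.Str.strip line) "import " = true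
      · rw [bTag_import line h1 h2, List.singleton_append, bAfterC_I]
        simp only [h2, if_true, Bool.false_eq_true, if_false]
        exact ih
      · rw [Bool.not_eq_true] at h2
        have hc := code_eq line h1 h2
        by_cases h3 : PySem.Str.startswith (PySem.Str.strip line) "open " = true
        · have hcode : bStartsCode (PySem.Str.strip line) = true := by rw [← hc, h3]; simp
          rw [bTag_code line h1 h2 hcode, List.singleton_append, bAfterC_C]
          simp only [h2, h3, Bool.false_eq_true, if_false, if_true]
          exact aLoop_true rest
        · rw [Bool.not_eq_true] at h3
          by_cases h4 : pyStartswithCmd (PySem.Str.strip line) = true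
          · have hcode : bStartsCode (PySem.Str.strip line) = true := by rw [← hc, h4]; simp
            rw [bTag_code line h1 h2 hcode, List.singleton_append, bAfterC_C]
            simp only [h2, h3, h4, Bool.false_eq_true, if_false, if_true]
            exact aLoop_true rest
          · rw [Bool.not_eq_true] at h4
            have hcode : bStartsCode (PySem.Str.strip line) = false := by rw [← hc, h3, h4]; rfl
            rw [bTag_plain line h1 h2 hcode, List.nil_append]
            simp only [h2, h3, h4, Bool.false_eq_true, if_false]
            exact ih

-- ===== VERDICT =====
theorem has_misplaced_import_py_spec : Claim_equal_has_misplaced_import_py := by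
  intro lean_code _
  unfold Spec_has_misplaced_import_py has_misplaced_import_py has_misplaced_import_py_alt
  simp only [isIn_I]
  exact aLoop_false (PySem.Str.splitlines lean_code)
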